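-- pv_equiv track=rewrite | github.com/kkr010128/codebert | problem233/problem233_133.py | solve
-- ===== SOURCE A (Python) =====
-- def solve(N: int, P: "List[int]"):
--     min_p = P[0]
--     count = 0
--     for p in P:
--         if p <= min_p:
--             min_p = p
--             count += 1
--
--     return count
-- ===== SOURCE B (Python) =====
-- def solve(N, P):
--     m = [P[0]]
--     for p in P[1:]:
--         m.append(p if p < m[-1] else m[-1])
--     return 1 + sum(1 for p, q in zip(P[1:], m) if p <= q)
-- ===== Notes on version B (the rewrite author's own statement) =====
-- stated objective: alternative
-- what changed: Replaces A's single interleaved running-min-and-count loop by two separate passes: first build the prefix-minimum table, then count by zipping the tail of P against that table.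
import Mathlib
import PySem

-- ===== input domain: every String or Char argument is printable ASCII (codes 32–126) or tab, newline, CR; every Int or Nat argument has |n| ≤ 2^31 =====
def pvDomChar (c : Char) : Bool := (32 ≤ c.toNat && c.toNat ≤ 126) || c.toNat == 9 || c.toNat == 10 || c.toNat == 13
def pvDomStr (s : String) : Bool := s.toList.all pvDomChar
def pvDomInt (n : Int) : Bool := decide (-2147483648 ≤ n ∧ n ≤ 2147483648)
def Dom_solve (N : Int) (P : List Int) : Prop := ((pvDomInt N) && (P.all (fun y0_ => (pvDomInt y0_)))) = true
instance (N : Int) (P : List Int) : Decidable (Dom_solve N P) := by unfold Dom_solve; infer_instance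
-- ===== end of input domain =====

-- B replaces A's single interleaved running-min-and-count loop by two passes: build the
-- prefix-minimum table, then count by zipping the tail of P against that table (alternative decomposition).


-- ===== PORT A =====
def solve (N : Int) (P : List Int) : Int :=
  match PySem.List.pyGet? P 0 with
  | none => 0   -- unreachable under Pre_solve: Python raises IndexError on empty P
  | some m0 =>
    (P.foldl (fun (s : Int × Int) p => if p ≤ s.1 then (p, s.2 + 1) else s) (m0, 0)).2

-- ===== PORT B =====
def solve_alt (N : Int) (P : List Int) : Int :=
  match PySem.List.pyGet? P 0 with
  | none => 0   -- unreachable under Pre_solve: Python raises IndexError on empty P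
  | some p0 =>
    let rest := PySem.List.slice P (some 1) none
    let m := rest.foldl (fun acc p => acc ++ [if p < acc.getLast! then p else acc.getLast!]) [p0]
    1 + (rest.zip m).foldl (fun a pq => if pq.1 ≤ pq.2 then a + 1 else a) 0

-- ===== PRECONDITION & SPEC =====
-- Pre_ excludes exactly the empty list, on which the Python A raises IndexError (P[0]).
def Pre_solve (N : Int) (P : List Int) : Prop := P ≠ []
instance (N : Int) (P : List Int) : Decidable (Pre_solve N P) := by unfold Pre_solve; infer_instance
def pvWitness_solve : Int × List Int := (3, [2, 1])

def Spec_solve (N : Int) (P : List Int) (out : Int) : Prop := out = solve_alt N P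
instance (N : Int) (P : List Int) (out : Int) : Decidable (Spec_solve N P out) := by unfold Spec_solve; infer_instance

-- ===== CLAIM (what is proved, stated in full; the proofs are below) =====
def Claim_equal_solve : Prop := ∀ (N : Int) (P : List Int), Dom_solve N P → Pre_solve N P → Spec_solve N P (solve N P)

-- ===== LEMMAS AND PROOFS =====

/-- Reference count: number of prefix-minimum positions of `l` given current min `c`. -/
def pvG (c : Int) (l : List Int) : Int :=
  match l with
  | [] => 0
  | p :: ps => (if p ≤ c then 1 else 0) + pvG (if p ≤ c then p else c) ps

/-- Reference prefix-minimum table of `l` given current min `c`. -/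
def pvMs (c : Int) (l : List Int) : List Int :=
  match l with
  | [] => []
  | p :: ps => (if p < c then p else c) :: pvMs (if p < c then p else c) ps

theorem pvG_cong (c : Int) (l : List Int) (p : Int) :
    pvG (if p ≤ c then p else c) l = pvG (if p < c then p else c) l := by
  by_cases h : p = c
  · subst h; simp
  · by_cases h2 : p ≤ c
    · rw [if_pos h2, if_pos (lt_of_le_of_ne h2 h)]
    · rw [if_neg h2, if_neg (fun hl => h2 (le_of_lt hl))]

theorem foldA (l : List Int) (c k : Int) :
    (l.foldl (fun (s : Int × Int) p => if p ≤ s.1 then (p, s.2 + 1) else s) (c, k)).2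
      = k + pvG c l := by
  induction l generalizing c k with
  | nil => simp [pvG]
  | cons p ps ih =>
    simp only [List.foldl_cons, pvG]
    by_cases h : p ≤ c
    · simp only [if_pos h, ih]; ring
    · simp only [if_neg h, ih]; ring

theorem getLast!_concat (xs : List Int) (c : Int) : (xs ++ [c]).getLast! = c := by
  have : (xs ++ [c]).getLast? = some c := by simp
  simp [List.getLast!_eq_getLast?_getD, this]

theorem foldB (l : List Int) (pre : List Int) (c : Int) :
    l.foldl (fun acc p => acc ++ [if p < acc.getLast! then p else acc.getLast!]) (pre ++ [c])
      = pre ++ [c] ++ pvMs c l := by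
  induction l generalizing pre c with
  | nil => simp [pvMs]
  | cons p ps ih =>
    simp only [List.foldl_cons, getLast!_concat, pvMs]
    have := ih (pre ++ [c]) (if p < c then p else c)
    simpa [List.append_assoc] using this

theorem foldZip (l : List Int) (c k : Int) :
    (l.zip (c :: pvMs c l)).foldl (fun a pq => if pq.1 ≤ pq.2 then a + 1 else a) k
      = k + pvG c l := by
  induction l generalizing c k with
  | nil => simp [pvG]
  | cons p ps ih =>
    simp only [pvMs, List.zip_cons_cons, List.foldl_cons, pvG]
    rw [ih]
    by_cases h : p ≤ c
    · rw [if_pos h, if_pos h, ← pvG_cong]; ring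
    · rw [if_neg h, if_neg h, ← pvG_cong]; ring

theorem solve_eq (N : Int) (p0 : Int) (rest : List Int) :
    solve N (p0 :: rest) = 1 + pvG p0 rest := by
  simp only [solve, PySem.List.pyGet?]
  norm_num [PySem.List.pyIdx?, foldA]

theorem solve_alt_eq (N : Int) (p0 : Int) (rest : List Int) :
    solve_alt N (p0 :: rest) = 1 + pvG p0 rest := by
  simp only [solve_alt, PySem.List.pyGet?]
  norm_num [PySem.List.pyIdx?, PySem.List.slice_from_one]
  have hb := foldB rest ([] : List Int) p0
  simp only [List.nil_append, List.getLast!_eq_getLast?_getD, Int.default_eq_zero] at hb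
  rw [hb]
  simp only [List.singleton_append]
  rw [foldZip]
  ring

-- ===== VERDICT (by name: the statement is the Claim_ definition above) =====
theorem solve_spec : Claim_equal_solve := by
  intro N P _ hpre
  match P with
  | [] => exact absurd rfl hpre
  | p0 :: rest =>
    show solve N (p0 :: rest) = solve_alt N (p0 :: rest)
    rw [solve_eq, solve_alt_eq]
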